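-- pv_equiv track=rewrite | github.com/xdlaba02/Advent-Of-Code-2023 | 14/part2.py | tilt_line
-- ===== SOURCE A (Python) =====
-- def tilt_line(line):
-- 	new_line = line.copy()
--
-- 	free_spot = 0
-- 	for i, c in enumerate(line):
-- 		if c == "#":
-- 			free_spot = i + 1
-- 		elif c == "O":
-- 			new_line[i] = '.'
-- 			new_line[free_spot] = 'O'
-- 			free_spot += 1
--
-- 	return new_line
-- ===== SOURCE B (Python) =====
-- def tilt_line(line):
-- 	# Pre-clear every rock, then scan segments between '#' walls, counting
-- 	# rocks per segment and backfilling them at the segment start.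
-- 	res = ['.' if c == 'O' else c for c in line]
-- 	seg_start = 0
-- 	count = 0
-- 	for i, c in enumerate(line):
-- 		if c == '#':
-- 			for j in range(seg_start, seg_start + count):
-- 				res[j] = 'O'
-- 			seg_start = i + 1
-- 			count = 0
-- 		elif c == 'O':
-- 			count += 1
-- 	for j in range(seg_start, seg_start + count):
-- 		res[j] = 'O'
-- 	return res
-- ===== Notes on version B (the rewrite author's own statement) =====
-- stated objective: alternative
-- what changed: Replaces the running free-spot pointer with a per-segment count-then-backfill pass over a pre-cleared copy: rocks are erased up front and each '#'/end-of-line boundary writes the segment's rock count back at the segment start.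
import Mathlib
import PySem

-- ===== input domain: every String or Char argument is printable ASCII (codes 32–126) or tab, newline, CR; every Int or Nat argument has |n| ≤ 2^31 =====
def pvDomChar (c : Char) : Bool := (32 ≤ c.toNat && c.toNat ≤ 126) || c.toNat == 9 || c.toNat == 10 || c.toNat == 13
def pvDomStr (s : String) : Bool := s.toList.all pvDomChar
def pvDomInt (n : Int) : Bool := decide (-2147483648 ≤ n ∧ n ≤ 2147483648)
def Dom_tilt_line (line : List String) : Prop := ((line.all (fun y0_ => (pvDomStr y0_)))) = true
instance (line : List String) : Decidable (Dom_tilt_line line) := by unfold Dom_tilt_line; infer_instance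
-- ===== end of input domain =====

-- B replaces A's running free-spot pointer with a pre-clear of all rocks plus a
-- per-segment count-and-backfill pass (objective: alternative decomposition).

-- ===== PORT A =====
-- the loop over enumerate(line): state (new_line, free_spot), index i counts consumed elements
def tiltA_go (nl : List String) (fs i : Nat) : List String → List String
  | [] => nl
  | c :: rest =>
    if c = "#" then tiltA_go nl (i + 1) (i + 1) rest
    else if c = "O" then tiltA_go ((nl.set i ".").set fs "O") (fs + 1) (i + 1) rest
    else tiltA_go nl fs (i + 1) rest

def tilt_line (line : List String) : List String :=
  tiltA_go line 0 0 line

-- ===== PORT B =====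
-- for j in range(start, start + cnt): res[j] = 'O'
def fillO (res : List String) (start cnt : Nat) : List String :=
  (List.range cnt).foldl (fun r j => r.set (start + j) "O") res

-- the loop over enumerate(line): state (res, seg_start, count); final backfill at the end
def tiltB_go (res : List String) (seg cnt i : Nat) : List String → List String
  | [] => fillO res seg cnt
  | c :: rest =>
    if c = "#" then tiltB_go (fillO res seg cnt) (i + 1) 0 (i + 1) rest
    else if c = "O" then tiltB_go res seg (cnt + 1) (i + 1) rest
    else tiltB_go res seg cnt (i + 1) rest

def tilt_line_alt (line : List String) : List String :=
  tiltB_go (line.map (fun c => if c = "O" then "." else c)) 0 0 0 line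

-- ===== PRECONDITION & SPEC =====
def Spec_tilt_line (line : List String) (out : List String) : Prop := out = tilt_line_alt line
instance (line : List String) (out : List String) : Decidable (Spec_tilt_line line out) := by unfold Spec_tilt_line; infer_instance

-- ===== CLAIM (what is proved, stated in full; the proofs are below) =====
def Claim_equal_tilt_line : Prop := ∀ (line : List String), Dom_tilt_line line → Spec_tilt_line line (tilt_line line)

-- ===== LEMMAS AND PROOFS =====

theorem fillO_length (res : List String) (s n : Nat) :
    (fillO res s n).length = res.length := by
  unfold fillO
  induction (List.range n) generalizing res with
  | nil => rfl
  | cons a l ih => simp [List.foldl_cons, ih]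

theorem fillO_zero (res : List String) (s : Nat) : fillO res s 0 = res := rfl

theorem fillO_succ (res : List String) (s n : Nat) :
    fillO res s (n + 1) = (fillO res s n).set (s + n) "O" := by
  unfold fillO
  simp [List.range_succ]

theorem fillO_getElem? (res : List String) (s n j : Nat) (hj : j < res.length) :
    (fillO res s n)[j]? = if s ≤ j ∧ j < s + n then some "O" else res[j]? := by
  induction n with
  | zero =>
    simp only [fillO_zero]
    exact (if_neg (by omega)).symm
  | succ n ih =>
    rw [fillO_succ, List.getElem?_set]
    by_cases h : s + n = j
    · subst h
      simp [fillO_length, hj]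
    · rw [if_neg h, ih]
      by_cases h1 : s ≤ j ∧ j < s + n
      · rw [if_pos h1, if_pos (by omega)]
      · rw [if_neg h1, if_neg (by omega)]

theorem fillO_getElem?_ge (res : List String) (s n j : Nat) (hj : s + n ≤ j) :
    (fillO res s n)[j]? = res[j]? := by
  induction n with
  | zero => rfl
  | succ n ih =>
    rw [fillO_succ, List.getElem?_set, if_neg (by omega), ih (by omega)]

theorem go_eq (rest : List String) : ∀ (nl res : List String) (seg cnt i : Nat),
    nl.length = i + rest.length →
    res.length = nl.length →
    seg + cnt ≤ i →
    (∀ j, j < i → (fillO res seg cnt)[j]? = nl[j]?) →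
    (∀ j, nl[i + j]? = rest[j]?) →
    (∀ j, res[i + j]? = (rest[j]?).map (fun c => if c = "O" then "." else c)) →
    tiltA_go nl (seg + cnt) i rest = tiltB_go res seg cnt i rest := by
  induction rest with
  | nil =>
    intro nl res seg cnt i hlen hrlen hle h3 _ _
    show nl = fillO res seg cnt
    apply List.ext_getElem?
    intro j
    by_cases hj : j < i
    · exact (h3 j hj).symm
    · have hjlen : ¬ j < nl.length := by simp at hlen; omega
      rw [List.getElem?_eq_none (by omega),
          List.getElem?_eq_none (by rw [fillO_length]; omega)]
  | cons c rest ih =>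
    intro nl res seg cnt i hlen hrlen hle h3 h4 h5
    have hilen : i < nl.length := by simp at hlen; omega
    have hnlc : nl[i]? = some c := by
      have := h4 0; simpa using this
    have hresc : res[i]? = some (if c = "O" then "." else c) := by
      have := h5 0; simpa using this
    have h4' : ∀ j, nl[(i + 1) + j]? = rest[j]? := by
      intro j
      have := h4 (j + 1)
      rw [show i + (j + 1) = i + 1 + j by omega] at this
      simpa using this
    have h5' : ∀ j, res[(i + 1) + j]? = (rest[j]?).map (fun c => if c = "O" then "." else c) := by
      intro j
      have := h5 (j + 1)
      rw [show i + (j + 1) = i + 1 + j by omega] at this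
      simpa using this
    by_cases hc : c = "#"
    · rw [tiltA_go, tiltB_go, if_pos hc, if_pos hc]
      have key : ∀ j, j < i + 1 → (fillO res seg cnt)[j]? = nl[j]? := by
        intro j hj
        by_cases hji : j < i
        · exact h3 j hji
        · have : j = i := by omega
          subst this
          rw [fillO_getElem?_ge _ _ _ _ (by omega), hresc, hnlc, hc]
          simp
      have := ih nl (fillO res seg cnt) (i + 1) 0 (i + 1)
        (by simp at hlen ⊢; omega)
        (by rw [fillO_length]; exact hrlen)
        (by omega)
        (by intro j hj; rw [fillO_zero]; exact key j hj)
        h4'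
        (by intro j
            rw [fillO_getElem?_ge _ _ _ _ (by omega)]
            exact h5' j)
      simpa using this
    · by_cases hcO : c = "O"
      · rw [tiltA_go, tiltB_go, if_neg hc, if_neg hc, if_pos hcO, if_pos hcO]
        have key : ∀ j, j < i + 1 → (fillO res seg (cnt + 1))[j]? = ((nl.set i ".").set (seg + cnt) "O")[j]? := by
          intro j hj
          rw [fillO_getElem? _ _ _ _ (by omega), List.getElem?_set, List.getElem?_set]
          by_cases hjf : seg + cnt = j
          · subst hjf
            rw [if_pos (by omega), if_pos rfl, if_pos (by simp; omega)]
          · rw [if_neg hjf]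
            by_cases hji : i = j
            · subst hji
              rw [if_pos rfl, if_pos hilen, if_neg (by omega), hresc, hcO]
              simp
            · rw [if_neg hji]
              have h3j := h3 j (by omega)
              rw [fillO_getElem? _ _ _ _ (by omega)] at h3j
              by_cases hin : seg ≤ j ∧ j < seg + cnt
              · rw [if_pos (by omega), ← h3j, if_pos hin]
              · rw [if_neg (by omega), ← h3j, if_neg hin]
        have := ih ((nl.set i ".").set (seg + cnt) "O") res seg (cnt + 1) (i + 1)
          (by simp at hlen ⊢; omega)
          (by simpa using hrlen)
          (by omega)
          key
          (by intro j
              rw [List.getElem?_set, List.getElem?_set,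
                  if_neg (by omega), if_neg (by omega)]
              exact h4' j)
          h5'
        simpa [Nat.add_assoc] using this
      · rw [tiltA_go, tiltB_go, if_neg hc, if_neg hc, if_neg hcO, if_neg hcO]
        apply ih nl res seg cnt (i + 1)
          (by simp at hlen ⊢; omega)
          hrlen
          (by omega)
        · intro j hj
          by_cases hji : j < i
          · exact h3 j hji
          · have : j = i := by omega
            subst this
            rw [fillO_getElem?_ge _ _ _ _ (by omega), hresc, hnlc]
            simp [hcO]
        · exact h4'
        · exact h5'

-- ===== VERDICT (by name: the statement is the Claim_ definition above) =====
theorem tilt_line_spec : Claim_equal_tilt_line := by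
  intro line _
  show tilt_line line = tilt_line_alt line
  unfold tilt_line tilt_line_alt
  have := go_eq line line (line.map (fun c => if c = "O" then "." else c)) 0 0 0
    (by simp) (by simp) (by omega)
    (by intro j hj; omega)
    (by intro j; simp)
    (by intro j; simp)
  simpa using this
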